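-- pv_equiv track=rewrite | github.com/anabcodes/exercicios-beecrowd-resolvidos | exercicios/3424.py | monotonosMaximaisNaoTriviais
-- ===== SOURCE A (Python) =====
-- def monotonosMaximaisNaoTriviais(trecho, n):
--     i = 0
--     contador = 0
--
--     while i < n:
--         j = i + 1
--
--         while j < n and trecho[j] == trecho[i]:
--             j += 1
--
--         comprimento_monotono = j - i
--         if comprimento_monotono >= 2 and trecho[i] == 'a':
--             contador += comprimento_monotono
--
--         i = j
--
--     return contador
-- ===== SOURCE B (Python) =====
-- def monotonosMaximaisNaoTriviais(trecho, n):
--     contador = 0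
--     for k in range(n):
--         c = trecho[k]
--         if c == 'a' and ((k + 1 < n and trecho[k + 1] == c) or (k > 0 and trecho[k - 1] == c)):
--             contador += 1
--     return contador
-- ===== Notes on version B (the rewrite author's own statement) =====
-- stated objective: alternative
-- what changed: Replaces A's run-length scan (nested whiles that find each run's end and add its length) with a stateless per-position neighbour test: position k counts 1 iff trecho[k]=='a' and an adjacent position inside [0,n) holds the same character, which characterises membership in a maximal 'a'-run of length>=2.
-- outside the precondition, e.g. on monotonosMaximaisNaoTriviais('', 1): A returns 0, B raises IndexError
import Mathlib
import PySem

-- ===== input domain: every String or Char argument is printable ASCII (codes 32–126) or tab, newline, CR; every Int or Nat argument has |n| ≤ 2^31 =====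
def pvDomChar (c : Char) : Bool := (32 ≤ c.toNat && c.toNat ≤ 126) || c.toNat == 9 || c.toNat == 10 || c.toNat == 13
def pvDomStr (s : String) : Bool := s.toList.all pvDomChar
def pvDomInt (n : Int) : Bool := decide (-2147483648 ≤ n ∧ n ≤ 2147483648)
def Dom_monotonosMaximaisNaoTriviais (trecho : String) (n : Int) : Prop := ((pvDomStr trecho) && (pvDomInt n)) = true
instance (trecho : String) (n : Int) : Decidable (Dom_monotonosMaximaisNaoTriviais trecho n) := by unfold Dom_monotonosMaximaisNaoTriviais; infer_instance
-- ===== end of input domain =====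

-- B replaces A's run-length scan by a stateless per-position neighbour test (count positions k with trecho[k]='a' adjacent to an equal character inside [0,n)); alternative decomposition, same O(n) cost.


-- ===== PORT A =====
-- inner 'while j < n and trecho[j] == trecho[i]': c is the already-read trecho[i]
def pvRunEnd (cs : List Char) (n : Int) (c : Char) (j : Int) : Int :=
  if h : j < n ∧ PySem.List.pyGetD cs j ' ' = c then pvRunEnd cs n c (j + 1) else j
termination_by (n - j).toNat
decreasing_by omega

theorem pvRunEnd_ge (cs : List Char) (n : Int) (c : Char) (j : Int) :
    j ≤ pvRunEnd cs n c j := by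
  unfold pvRunEnd
  split
  · exact le_trans (by omega) (pvRunEnd_ge cs n c (j + 1))
  · exact le_refl j
termination_by (n - j).toNat
decreasing_by omega

-- outer 'while i < n' loop of A
def pvALoop (cs : List Char) (n : Int) (i acc : Int) : Int :=
  if _h : i < n then
    let j := pvRunEnd cs n (PySem.List.pyGetD cs i ' ') (i + 1)
    pvALoop cs n j
      (if 2 ≤ j - i ∧ PySem.List.pyGetD cs i ' ' = 'a' then acc + (j - i) else acc)
  else acc
termination_by (n - i).toNat
decreasing_by
  have := pvRunEnd_ge cs n (PySem.List.pyGetD cs i ' ') (i + 1)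
  omega

def monotonosMaximaisNaoTriviais (trecho : String) (n : Int) : Int :=
  pvALoop trecho.toList n 0 0

-- ===== PORT B =====
-- body of B's single for-loop: position k counts 1 iff trecho[k]='a' and a neighbour inside [0,n) is equal
def pvBStep (cs : List Char) (n : Int) (acc k : Int) : Int :=
  let c := PySem.List.pyGetD cs k ' '
  if c = 'a' ∧ ((k + 1 < n ∧ PySem.List.pyGetD cs (k + 1) ' ' = c) ∨
                (0 < k ∧ PySem.List.pyGetD cs (k - 1) ' ' = c))
  then acc + 1 else acc

def monotonosMaximaisNaoTriviais_alt (trecho : String) (n : Int) : Int :=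
  (PySem.List.pyRange 0 n 1).foldl (pvBStep trecho.toList n) 0

-- ===== PRECONDITION & SPEC =====
-- Pre_ excludes inputs with n exceeding the string length: there A raises IndexError (and so does B), except the lone corner ('', 1) where A's and-short-circuit returns 0 while B's direct indexing raises.
def Pre_monotonosMaximaisNaoTriviais (trecho : String) (n : Int) : Prop :=
  n ≤ (trecho.toList.length : Int)
instance (trecho : String) (n : Int) : Decidable (Pre_monotonosMaximaisNaoTriviais trecho n) := by
  unfold Pre_monotonosMaximaisNaoTriviais; infer_instance

def pvWitness_monotonosMaximaisNaoTriviais : String × Int := ("aab aa", 6)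

def Spec_monotonosMaximaisNaoTriviais (trecho : String) (n : Int) (out : Int) : Prop := out = monotonosMaximaisNaoTriviais_alt trecho n
instance (trecho : String) (n : Int) (out : Int) : Decidable (Spec_monotonosMaximaisNaoTriviais trecho n out) := by unfold Spec_monotonosMaximaisNaoTriviais; infer_instance

-- ===== CLAIM (what is proved, stated in full; the proofs are below) =====
def Claim_equal_monotonosMaximaisNaoTriviais : Prop := ∀ (trecho : String) (n : Int), Dom_monotonosMaximaisNaoTriviais trecho n → Pre_monotonosMaximaisNaoTriviais trecho n → Spec_monotonosMaximaisNaoTriviais trecho n (monotonosMaximaisNaoTriviais trecho n)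

-- ===== LEMMAS AND PROOFS =====

-- reference function: total run-count on an explicit list of characters
def pvS : List Char → Int
  | [] => 0
  | c :: t =>
    (if 2 ≤ ((t.takeWhile (· == c)).length + 1 : Int) ∧ c = 'a'
     then ((t.takeWhile (· == c)).length + 1 : Int) else 0) + pvS (t.dropWhile (· == c))
termination_by l => l.length
decreasing_by
  have := List.length_dropWhile_le (· == c) t
  simp; omega

theorem pvS_nil : pvS [] = 0 := by simp [pvS]

-- dropWhile is drop of the takeWhile length
theorem pvDropWhile_eq_drop {p : Char → Bool} (l : List Char) :
    l.dropWhile p = l.drop (l.takeWhile p).length := by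
  induction l with
  | nil => simp
  | cons x t ih =>
    by_cases h : p x
    · simp [h, ih]
    · simp [h]

-- characterization of A's inner while loop
theorem pvRunEnd_eq (cs : List Char) (n : Int) (c : Char) (j : Int)
    (h0 : 0 ≤ j) (h1 : j ≤ n) (h2 : n ≤ (cs.length : Int)) :
    pvRunEnd cs n c j =
      j + ((((cs.take n.toNat).drop j.toNat).takeWhile (· == c)).length : Int) := by
  unfold pvRunEnd
  split
  · rename_i h
    obtain ⟨hjn, hc⟩ := h
    have hjl : j.toNat < (cs.take n.toNat).length := by
      simp [List.length_take]; omega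
    have hdrop : (cs.take n.toNat).drop j.toNat =
        (cs.take n.toNat)[j.toNat] :: (cs.take n.toNat).drop (j.toNat + 1) :=
      List.drop_eq_getElem_cons hjl
    have hget : (cs.take n.toNat)[j.toNat] = c := by
      have : PySem.List.pyGetD cs j ' ' = cs[j.toNat] :=
        PySem.List.pyGetD_eq_getElem cs ' ' h0 (by omega)
      rw [List.getElem_take]
      rw [this] at hc; exact hc
    have ih := pvRunEnd_eq cs n c (j + 1) (by omega) (by omega) h2
    rw [ih, hdrop, hget]
    have hnat : ((j : Int) + 1).toNat = j.toNat + 1 := by omega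
    simp [hnat]
    ring
  · rename_i h
    rcases lt_or_ge j n with hjn | hjn
    · have hc : ¬ PySem.List.pyGetD cs j ' ' = c := fun hc => h ⟨hjn, hc⟩
      have hjl : j.toNat < (cs.take n.toNat).length := by
        simp [List.length_take]; omega
      have hdrop : (cs.take n.toNat).drop j.toNat =
          (cs.take n.toNat)[j.toNat] :: (cs.take n.toNat).drop (j.toNat + 1) :=
        List.drop_eq_getElem_cons hjl
      have hget : (cs.take n.toNat)[j.toNat] = PySem.List.pyGetD cs j ' ' := by
        rw [List.getElem_take]
        exact (PySem.List.pyGetD_eq_getElem cs ' ' h0 (by omega)).symm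
      rw [hdrop, hget]
      simp [hc]
    · have hnil : (cs.take n.toNat).drop j.toNat = [] := by
        apply List.drop_eq_nil_of_le
        simp [List.length_take]; omega
      simp [hnil]
termination_by (n - j).toNat
decreasing_by omega

-- characterization of A's outer while loop
theorem pvALoop_eq (cs : List Char) (n : Int) (i acc : Int)
    (h0 : 0 ≤ i) (h2 : n ≤ (cs.length : Int)) :
    pvALoop cs n i acc = acc + pvS ((cs.take n.toNat).drop i.toNat) := by
  unfold pvALoop
  split
  · rename_i hin
    have hjl : i.toNat < (cs.take n.toNat).length := by
      simp [List.length_take]; omega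
    set c := PySem.List.pyGetD cs i ' ' with hcdef
    have hget : (cs.take n.toNat)[i.toNat] = c := by
      rw [List.getElem_take]
      exact (PySem.List.pyGetD_eq_getElem cs ' ' h0 (by omega)).symm
    set t := (cs.take n.toNat).drop (i.toNat + 1) with htdef
    have hdrop : (cs.take n.toNat).drop i.toNat = c :: t := by
      rw [List.drop_eq_getElem_cons hjl, hget]
    have hre : pvRunEnd cs n c (i + 1) =
        (i + 1) + (((t.takeWhile (· == c)).length : Int)) := by
      have h := pvRunEnd_eq cs n c (i + 1) (by omega) (by omega) h2
      rw [h]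
      have hnat : ((i : Int) + 1).toNat = i.toNat + 1 := by omega
      rw [hnat]
    rw [hre]
    set tw := ((t.takeWhile (· == c)).length : Int) with htw
    have htw0 : 0 ≤ tw := by positivity
    have ih := pvALoop_eq cs n (i + 1 + tw)
      (if 2 ≤ i + 1 + tw - i ∧ c = 'a' then acc + (i + 1 + tw - i) else acc)
      (by omega) h2
    rw [ih]
    have hdropj : (cs.take n.toNat).drop (i + 1 + tw).toNat = t.dropWhile (· == c) := by
      rw [pvDropWhile_eq_drop, htdef, List.drop_drop]
      congr 1
      rw [htw, htdef]
      omega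
    rw [hdropj, hdrop]
    rw [pvS]
    split_ifs with hA hB hB
    · ring
    · exact absurd ⟨by omega, hA.2⟩ hB
    · exact absurd ⟨by omega, hB.2⟩ hA
    · ring
  · rename_i hin
    have hnil : (cs.take n.toNat).drop i.toNat = [] := by
      apply List.drop_eq_nil_of_le
      simp [List.length_take]; omega
    simp [hnil, pvS]
termination_by (n - i).toNat
decreasing_by
  have := pvRunEnd_ge cs n (PySem.List.pyGetD cs i ' ') (i + 1)
  omega

-- B's count, expressed as a recursion that remembers only the previous character
def pvT (prev : Option Char) : List Char → Int
  | [] => 0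
  | c :: t => (if c = 'a' ∧ (t.head? = some c ∨ prev = some c) then 1 else 0) + pvT (some c) t

-- head? detects a nonempty takeWhile
theorem pvHead_takeWhile (t : List Char) (c : Char) :
    t.head? = some c ↔ 1 ≤ ((t.takeWhile (· == c)).length : Int) := by
  cases t with
  | nil => simp
  | cons y r =>
    by_cases h : y = c
    · subst h; simp
    · have h' : (y == c) = false := by simp [h]
      simp [h', h]

-- running pvT inside a run of c's computes the run tail plus pvS of the remainder
theorem pvT_run (t : List Char) (c : Char) :
    pvT (some c) t =
      (if c = 'a' then ((t.takeWhile (· == c)).length : Int) else 0) +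
        pvS (t.dropWhile (· == c)) := by
  induction t generalizing c with
  | nil => simp [pvT, pvS_nil]
  | cons x t' ih =>
    by_cases hx : x = c
    · subst hx
      rw [pvT, List.takeWhile_cons_of_pos (by simp), List.dropWhile_cons_of_pos (by simp)]
      rw [ih x]
      by_cases ha : x = 'a'
      · rw [if_pos ⟨ha, Or.inr rfl⟩, if_pos ha, if_pos ha]
        push_cast [List.length_cons]
        ring
      · rw [if_neg (fun hc => ha hc.1), if_neg ha, if_neg ha]
        ring
    · have hx' : (x == c) = false := by simp [hx]
      rw [pvT, List.takeWhile_cons_of_neg (by simp [hx']),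
          List.dropWhile_cons_of_neg (by simp [hx'])]
      rw [ih x, pvS]
      have hne : ((some c : Option Char) = some x) ↔ False := by simp [Ne.symm hx]
      simp only [List.length_nil, Int.natCast_zero, ite_self, zero_add, hne, or_false]
      by_cases ha : x = 'a'
      · by_cases hh : t'.head? = some x
        · have h1 := (pvHead_takeWhile t' x).mp hh
          rw [if_pos ⟨ha, hh⟩, if_pos ha, if_pos ⟨by omega, ha⟩]
          ring
        · have h0 : ¬ (1 : Int) ≤ ((t'.takeWhile (· == x)).length : Int) :=
            fun h => hh ((pvHead_takeWhile t' x).mpr h)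
          rw [if_neg (fun hc => hh hc.2), if_pos ha, if_neg (fun hc => h0 (by omega))]
          omega
      · rw [if_neg (fun hc => ha hc.1), if_neg ha, if_neg (fun hc => ha hc.2)]
        ring

theorem pvT_none (l : List Char) : pvT none l = pvS l := by
  cases l with
  | nil => simp [pvT, pvS_nil]
  | cons c t =>
    rw [pvT, pvT_run t c, pvS]
    simp only [reduceCtorEq, or_false]
    by_cases ha : c = 'a'
    · by_cases hh : t.head? = some c
      · have h1 := (pvHead_takeWhile t c).mp hh
        rw [if_pos ⟨ha, hh⟩, if_pos ha, if_pos ⟨by omega, ha⟩]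
        ring
      · have h0 : ¬ (1 : Int) ≤ ((t.takeWhile (· == c)).length : Int) :=
          fun h => hh ((pvHead_takeWhile t c).mpr h)
        rw [if_neg (fun hc => hh hc.2), if_pos ha, if_neg (fun hc => h0 (by omega))]
        omega
    · rw [if_neg (fun hc => ha hc.1), if_neg ha, if_neg (fun hc => ha hc.2)]
      ring

-- B's fold over range(k, n) equals pvT on the remaining characters, with the previous character as state
theorem pvBFold_eq (cs : List Char) (n : Int) (h2 : n ≤ (cs.length : Int))
    (k acc : Int) (hk0 : 0 ≤ k) (hkn : k ≤ n) :
    (PySem.List.pyRange k n 1).foldl (pvBStep cs n) acc =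
      acc + pvT (if 0 < k then some (PySem.List.pyGetD cs (k - 1) ' ') else none)
        ((cs.take n.toNat).drop k.toNat) := by
  rcases lt_or_ge k n with hlt | hge
  · rw [PySem.List.pyRange_one_cons hlt, List.foldl_cons]
    have hkl : k.toNat < (cs.take n.toNat).length := by
      simp [List.length_take]; omega
    set c := PySem.List.pyGetD cs k ' ' with hcdef
    have hget : (cs.take n.toNat)[k.toNat] = c := by
      rw [List.getElem_take]
      exact (PySem.List.pyGetD_eq_getElem cs ' ' hk0 (by omega)).symm
    set t := (cs.take n.toNat).drop (k.toNat + 1) with htdef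
    have hdrop : (cs.take n.toNat).drop k.toNat = c :: t := by
      rw [List.drop_eq_getElem_cons hkl, hget]
    have ih := pvBFold_eq cs n h2 (k + 1) (pvBStep cs n acc k) (by omega) (by omega)
    have hnat : ((k : Int) + 1).toNat = k.toNat + 1 := by omega
    have hprevK : (if 0 < k + 1 then some (PySem.List.pyGetD cs (k + 1 - 1) ' ') else none)
        = some c := by
      rw [if_pos (by omega), show k + 1 - 1 = k from by ring, hcdef]
    rw [ih, hdrop, hprevK, hnat, ← htdef, pvT]
    -- translate the two neighbour tests
    have hnext : (k + 1 < n ∧ PySem.List.pyGetD cs (k + 1) ' ' = c) ↔ t.head? = some c := by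
      by_cases hlt1 : k + 1 < n
      · have hl1 : k.toNat + 1 < (cs.take n.toNat).length := by
          simp [List.length_take]; omega
        have hth : t.head? = some ((cs.take n.toNat)[k.toNat + 1]) := by
          rw [htdef, List.head?_drop, List.getElem?_eq_getElem hl1]
        have hg1 : PySem.List.pyGetD cs (k + 1) ' ' = (cs.take n.toNat)[k.toNat + 1] := by
          rw [List.getElem_take, PySem.List.pyGetD_eq_getElem cs ' ' (by omega) (by omega)]
          simp only [show ((k + 1 : Int)).toNat = k.toNat + 1 from by omega]
        rw [hth, hg1]
        simp [hlt1]
      · have ht0 : t = [] := by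
          rw [htdef]
          apply List.drop_eq_nil_of_le
          simp [List.length_take]; omega
        simp [hlt1, ht0]
    have hprev : (0 < k ∧ PySem.List.pyGetD cs (k - 1) ' ' = c) ↔
        (if 0 < k then some (PySem.List.pyGetD cs (k - 1) ' ') else none) = some c := by
      by_cases h : 0 < k <;> simp [h]
    rw [show pvBStep cs n acc k =
          (if c = 'a' ∧ (t.head? = some c ∨
              (if 0 < k then some (PySem.List.pyGetD cs (k - 1) ' ') else none) = some c)
           then acc + 1 else acc) from by
      rw [pvBStep]
      simp only [← hcdef]
      rw [if_congr (and_congr_right fun _ => or_congr hnext hprev) rfl rfl]]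
    split_ifs <;> ring
  · have hkeq : k = n := le_antisymm hkn hge
    rw [PySem.List.pyRange_one_eq_nil (by omega)]
    have hnil : (cs.take n.toNat).drop k.toNat = [] := by
      apply List.drop_eq_nil_of_le
      simp [List.length_take]; omega
    simp [hnil, pvT]
termination_by (n - k).toNat
decreasing_by omega

-- ===== VERDICT (by name: the statement is the Claim_ definition above) =====
theorem monotonosMaximaisNaoTriviais_spec : Claim_equal_monotonosMaximaisNaoTriviais := by
  intro trecho n _ hpre
  unfold Spec_monotonosMaximaisNaoTriviais monotonosMaximaisNaoTriviais
  unfold monotonosMaximaisNaoTriviais_alt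
  unfold Pre_monotonosMaximaisNaoTriviais at hpre
  rcases lt_or_ge n 0 with hn | hn
  · unfold pvALoop
    rw [dif_neg (by omega : ¬ (0 : Int) < n),
        PySem.List.pyRange_one_eq_nil (by omega : n ≤ (0 : Int))]
    rfl
  · rw [pvALoop_eq trecho.toList n 0 0 (by omega) hpre]
    rw [pvBFold_eq trecho.toList n hpre 0 0 (by omega) hn]
    rw [if_neg (by omega), pvT_none]
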